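-- pv_equiv track=rewrite | github.com/RobJenks/mnist-cnn-classifier | main.py | longest_line_length
-- ===== SOURCE A (Python) =====
-- def longest_line_length(s: str, letter_width, space_width) -> int:
--     longest, length = 0, 0
--
--     for x in s:
--         if x == '\n':
--             longest = max(longest, length)
--             length = 0
--         elif x == ' ':
--             length += space_width
--         else:
--             length += letter_width
--
--     return max(longest, length)
-- ===== SOURCE B (Python) =====
-- def line_width(line, letter_width, space_width):
--     spaces = line.count(' ')
--     return spaces * space_width + (len(line) - spaces) * letter_width
--
--
-- def longest_line_length(s: str, letter_width, space_width) -> int: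
--     widths = [line_width(line, letter_width, space_width) for line in s.split('\n')]
--     return max([0] + widths)
-- ===== Notes on version B (the rewrite author's own statement) =====
-- stated objective: faster
-- what changed: Replaces the char-by-char accumulator-and-branch loop with a line-level pass: split on '\n', compute each line's width in closed form from its space count (spaces*space_width + letters*letter_width), and take the maximum together with 0 as A's initial accumulator does.
import Mathlib
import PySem

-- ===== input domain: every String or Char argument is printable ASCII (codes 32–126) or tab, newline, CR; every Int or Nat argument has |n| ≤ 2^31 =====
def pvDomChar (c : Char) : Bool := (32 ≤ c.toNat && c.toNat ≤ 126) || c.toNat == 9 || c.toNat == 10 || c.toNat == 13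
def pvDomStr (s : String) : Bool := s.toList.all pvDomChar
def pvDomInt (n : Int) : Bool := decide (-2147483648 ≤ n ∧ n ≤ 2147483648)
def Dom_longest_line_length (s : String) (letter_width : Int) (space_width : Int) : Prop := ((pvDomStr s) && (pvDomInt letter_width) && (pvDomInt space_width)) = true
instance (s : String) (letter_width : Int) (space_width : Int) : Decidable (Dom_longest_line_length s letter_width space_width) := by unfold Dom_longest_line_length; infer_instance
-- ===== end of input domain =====

-- B replaces A's char-by-char accumulator loop by splitting on '\n' and computing
-- each line's width in closed form from its space count (objective: faster; measured faster at a timing run's sizes).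

-- ===== PORT A =====
def longest_line_length (s : String) (letter_width : Int) (space_width : Int) : Int :=
  let r := s.toList.foldl (fun (st : Int × Int) x =>
    if x = '\n' then (max st.1 st.2, 0)
    else if x = ' ' then (st.1, st.2 + space_width)
    else (st.1, st.2 + letter_width)) (0, 0)
  max r.1 r.2

-- ===== PORT B =====
-- line.count(' ') * space_width + (len(line) - line.count(' ')) * letter_width
def pvLineWidth (line : List Char) (letter_width : Int) (space_width : Int) : Int :=
  let spaces : Int := (PySem.Chars.count line [' '] : Int)
  spaces * space_width + ((line.length : Int) - spaces) * letter_width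

def longest_line_length_alt (s : String) (letter_width : Int) (space_width : Int) : Int :=
  let widths := (PySem.Chars.splitOn s.toList ['\n']).map
    (fun line => pvLineWidth line letter_width space_width)
  -- max([0] + widths)
  widths.foldl max 0

-- ===== PRECONDITION & SPEC =====
def Spec_longest_line_length (s : String) (letter_width : Int) (space_width : Int) (out : Int) : Prop := out = longest_line_length_alt s letter_width space_width
instance (s : String) (letter_width : Int) (space_width : Int) (out : Int) : Decidable (Spec_longest_line_length s letter_width space_width out) := by unfold Spec_longest_line_length; infer_instance

-- ===== CLAIM (what is proved, stated in full; the proofs are below) =====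
def Claim_equal_longest_line_length : Prop := ∀ (s : String) (letter_width : Int) (space_width : Int), Dom_longest_line_length s letter_width space_width → Spec_longest_line_length s letter_width space_width (longest_line_length s letter_width space_width)

-- ===== LEMMAS AND PROOFS =====

-- `s.count(c)` for a one-character needle is List.count
theorem count_go_singleton (c : Char) : ∀ (l : List Char) (acc : Nat),
    PySem.Chars.count.go [c] l.length l acc = acc + l.count c := by
  intro l
  induction l with
  | nil => intro acc; simp [PySem.Chars.count.go]
  | cons x t ih =>
    intro acc
    show PySem.Chars.count.go [c] (t.length + 1) (x :: t) acc = _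
    rw [PySem.Chars.count.go]
    by_cases hx : x = c
    · simp [hx, List.isPrefixOf, ih]
      omega
    · have hpre : [c].isPrefixOf (x :: t) = false := by
        simp [List.isPrefixOf]; exact Ne.symm hx
      simp only [hpre, Bool.false_eq_true, if_false, ih, List.count_cons]
      have : (c == x) = false := by simp [Ne.symm hx]
      simp
      exact hx

theorem count_singleton (c : Char) (l : List Char) :
    PySem.Chars.count l [c] = l.count c := by
  show (if ([c] : List Char).isEmpty then l.length + 1
        else PySem.Chars.count.go [c] l.length l 0) = l.count c
  simp [count_go_singleton]

-- reference single-char splitter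
def split1 (c : Char) : List Char → List (List Char)
  | [] => [[]]
  | x :: xs => if x = c then [] :: split1 c xs else
      match split1 c xs with
      | [] => [[x]]
      | h :: t => (x :: h) :: t

theorem split1_ne_nil (c : Char) (l : List Char) : split1 c l ≠ [] := by
  cases l with
  | nil => simp [split1]
  | cons x xs =>
    simp only [split1]
    split_ifs
    · simp
    · cases h : split1 c xs <;> simp

def mapFirst (f : List Char → List Char) : List (List Char) → List (List Char)
  | [] => []
  | h :: t => f h :: t

theorem splitOn_go_singleton (c : Char) : ∀ (l cur : List Char) (accs : List (List Char)),
    PySem.Chars.splitOn.go [c] (l.length + 1) l cur accs =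
      accs.reverse ++ mapFirst (cur.reverse ++ ·) (split1 c l) := by
  intro l
  induction l with
  | nil =>
    intro cur accs
    simp [PySem.Chars.splitOn.go, split1, mapFirst]
  | cons x t ih =>
    intro cur accs
    show PySem.Chars.splitOn.go [c] (t.length + 1 + 1) (x :: t) cur accs = _
    rw [PySem.Chars.splitOn.go]
    by_cases hx : x = c
    · subst hx
      have hpre : ([x] : List Char).isPrefixOf (x :: t) = true := by
        simp [List.isPrefixOf]
      rw [if_pos hpre]
      have hdrop : List.drop ([x] : List Char).length (x :: t) = t := by simp
      rw [hdrop]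
      rw [ih [] (cur.reverse :: accs)]
      obtain ⟨h, tl, hs⟩ : ∃ h tl, split1 x t = h :: tl := by
        cases hsp : split1 x t with
        | nil => exact absurd hsp (split1_ne_nil x t)
        | cons a b => exact ⟨a, b, rfl⟩
      simp [split1, hs, mapFirst]
    · have hpre : ([c] : List Char).isPrefixOf (x :: t) = false := by
        simp only [List.isPrefixOf]
        simp [Ne.symm hx]
      simp only [hpre, Bool.false_eq_true, if_false]
      rw [ih]
      obtain ⟨h, tl, hs⟩ : ∃ h tl, split1 c t = h :: tl := by
        cases hsp : split1 c t with
        | nil => exact absurd hsp (split1_ne_nil c t)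
        | cons a b => exact ⟨a, b, rfl⟩
      simp [split1, hx, hs, mapFirst]

theorem splitOn_singleton (c : Char) (l : List Char) :
    PySem.Chars.splitOn l [c] = split1 c l := by
  show PySem.Chars.splitOn.go [c] (l.length + 1) l [] [] = _
  rw [splitOn_go_singleton]
  cases h : split1 c l with
  | nil => exact absurd h (split1_ne_nil c l)
  | cons a b => simp [mapFirst]

-- the value A's loop computes, in recursive form
def pvH (lw sw : Int) : List Char → Int → Int
  | [], b => b
  | x :: cs, b =>
      if x = '\n' then max b (pvH lw sw cs 0)
      else pvH lw sw cs (b + (if x = ' ' then sw else lw))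

theorem foldA_eq_pvH (lw sw : Int) : ∀ (cs : List Char) (a b : Int),
    (max (cs.foldl (fun (st : Int × Int) x =>
        if x = '\n' then (max st.1 st.2, 0)
        else if x = ' ' then (st.1, st.2 + sw)
        else (st.1, st.2 + lw)) (a, b)).1
       (cs.foldl (fun (st : Int × Int) x =>
        if x = '\n' then (max st.1 st.2, 0)
        else if x = ' ' then (st.1, st.2 + sw)
        else (st.1, st.2 + lw)) (a, b)).2)
      = max a (pvH lw sw cs b) := by
  intro cs
  induction cs with
  | nil => intro a b; simp [pvH]
  | cons x t ih =>
    intro a b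
    by_cases hn : x = '\n'
    · simp only [List.foldl_cons, hn, pvH, ih, if_true]
      rw [max_assoc]
    · by_cases hsp : x = ' '
      · simp [hsp, pvH, ih]
      · simp [hn, hsp, pvH, ih]

theorem foldl_max_init (L : List Int) : ∀ (a b : Int),
    L.foldl max (max a b) = max a (L.foldl max b) := by
  induction L with
  | nil => intro a b; simp
  | cons x t ih =>
    intro a b
    simp only [List.foldl_cons, max_assoc, ih]

theorem pvLineWidth_nil (lw sw : Int) : pvLineWidth [] lw sw = 0 := by
  simp [pvLineWidth, count_singleton]

theorem pvLineWidth_cons (x : Char) (l : List Char) (lw sw : Int) :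
    pvLineWidth (x :: l) lw sw = (if x = ' ' then sw else lw) + pvLineWidth l lw sw := by
  simp only [pvLineWidth, count_singleton, List.count_cons, List.length_cons]
  by_cases hx : x = ' '
  · simp [hx]; ring
  · simp [hx]; ring

theorem pvH_eq (lw sw : Int) : ∀ (cs : List Char) (b : Int),
    pvH lw sw cs b =
      (match split1 '\n' cs with
       | [] => b
       | l1 :: t => (t.map (fun line => pvLineWidth line lw sw)).foldl max
            (b + pvLineWidth l1 lw sw)) := by
  intro cs
  induction cs with
  | nil => intro b; simp [pvH, split1, pvLineWidth_nil]
  | cons x t ih =>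
    intro b
    obtain ⟨l1, tl, hs⟩ : ∃ l1 tl, split1 '\n' t = l1 :: tl := by
      cases hsp : split1 '\n' t with
      | nil => exact absurd hsp (split1_ne_nil '\n' t)
      | cons a b => exact ⟨a, b, rfl⟩
    by_cases hn : x = '\n'
    · simp only [pvH, hn, split1, ih, hs, reduceIte]
      simp only [pvLineWidth_nil, add_zero, zero_add]
      rw [← foldl_max_init]
      simp only [List.map_cons, List.foldl_cons]
    · simp only [pvH, hn, ih, hs, split1, ite_false]
      rw [pvLineWidth_cons]
      by_cases hsp : x = ' ' <;> simp only [hsp, if_true, if_false] <;> ring_nf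

-- ===== VERDICT (by name: the statement is the Claim_ definition above) =====
theorem longest_line_length_spec : Claim_equal_longest_line_length := by
  intro s lw sw _
  show longest_line_length s lw sw = longest_line_length_alt s lw sw
  unfold longest_line_length longest_line_length_alt
  simp only []
  rw [foldA_eq_pvH, pvH_eq, splitOn_singleton]
  obtain ⟨l1, tl, hs⟩ : ∃ l1 tl, split1 '\n' s.toList = l1 :: tl := by
    cases hsp : split1 '\n' s.toList with
    | nil => exact absurd hsp (split1_ne_nil '\n' s.toList)
    | cons a b => exact ⟨a, b, rfl⟩
  simp only [hs, List.map_cons, List.foldl_cons, zero_add]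
  rw [← foldl_max_init]
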